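-- pv_equiv track=rewrite | github.com/nadavgreen/allocation-calculator | allocator_module/allocator.py | _hours_tally
-- ===== SOURCE A (Python) =====
-- def _hours_tally (names, hours):
-- 	total_hours = {}
-- 	for name in names:
-- 		if names[0] != name:
-- 			total_hours[name] = 0
-- 	for hour in hours:
-- 		i = 1
-- 		for hour_per_name in hour[1:]:
-- 			total_hours[names[i]] += hour_per_name
-- 			i += 1
--
-- 	return total_hours
-- ===== SOURCE B (Python) =====
-- def _hours_tally(names, hours):
-- 	# Column-major pass: start from a zero dict over the non-first names, then for
-- 	# each name column gather that column's hours across the rows; columns beyond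
-- 	# the widest row are skipped (no row reaches them, they contribute nothing).
-- 	total_hours = {name: 0 for name in names if names[0] != name}
-- 	width = 0
-- 	for row in hours:
-- 		width = max(width, len(row))
-- 	for i in range(1, min(len(names), width)):
-- 		key = names[i]
-- 		for row in hours:
-- 			if i < len(row):
-- 				total_hours[key] += row[i]
-- 	return total_hours
-- ===== Notes on version B (the rewrite author's own statement) =====
-- stated objective: alternative
-- what changed: Row-major scatter with a running index over each row's tail is replaced by a column-major pass: a zero dict built by comprehension, then for each name column i the rows are walked and row[i] is gathered under a length guard.
import Mathlib
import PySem

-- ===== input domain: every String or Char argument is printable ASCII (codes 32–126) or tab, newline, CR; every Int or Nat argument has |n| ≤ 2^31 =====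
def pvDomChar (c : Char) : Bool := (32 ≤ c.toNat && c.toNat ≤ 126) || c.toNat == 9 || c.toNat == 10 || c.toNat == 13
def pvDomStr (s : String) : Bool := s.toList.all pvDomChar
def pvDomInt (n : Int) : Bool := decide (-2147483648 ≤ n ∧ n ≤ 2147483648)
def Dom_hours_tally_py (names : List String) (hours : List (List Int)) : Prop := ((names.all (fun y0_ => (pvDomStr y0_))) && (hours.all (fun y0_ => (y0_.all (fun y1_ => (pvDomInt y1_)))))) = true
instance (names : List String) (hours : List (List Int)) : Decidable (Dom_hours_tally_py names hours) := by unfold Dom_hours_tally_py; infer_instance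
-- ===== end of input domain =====

-- B replaces A's row-major scatter (running index over each row's tail) by a column-major
-- gather from a comprehension-built zero dict; same cost, different traversal (objective: alternative).

-- ===== PORT A =====
-- inner-loop body: `total_hours[names[i]] += hour_per_name; i += 1`.
-- `names[i]` is pyGet? (none = IndexError, excluded by Pre_); the `+=` on the dict is ported
-- as `modify` (its insert-if-missing case is Python's KeyError, excluded by Pre_).
def tallyStepA (names : List String) (acc : PySem.Dict String Int × Int) (v : Int) :
    PySem.Dict String Int × Int :=
  match PySem.List.pyGet? names acc.2 with
  | some nm => (acc.1.modify nm 0 (· + v), acc.2 + 1)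
  | none => (acc.1, acc.2 + 1)

def hours_tally_py (names : List String) (hours : List (List Int)) : List (String × Int) :=
  let d0 : PySem.Dict String Int :=
    names.foldl (fun d name =>
      if PySem.List.pyGet? names 0 ≠ some name then d.insert name 0 else d) PySem.Dict.empty
  (hours.foldl (fun d hour =>
      ((PySem.List.slice hour (some 1) none).foldl (tallyStepA names) (d, 1)).1) d0).items

-- ===== PORT B =====
-- `{name: 0 for name in names if names[0] != name}` as Dict.ofList of the filtered pairs;
-- `total_hours[key] += row[i]` as `modify` (its insert-if-missing case is Python's KeyError,
-- excluded by Pre_); `names[i]`/`row[i]` with 1 ≤ i < len are pyGetD (always in range here).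
def hours_tally_py_alt (names : List String) (hours : List (List Int)) : List (String × Int) :=
  let d0 : PySem.Dict String Int :=
    PySem.Dict.ofList
      ((names.filter (fun name => decide (PySem.List.pyGet? names 0 ≠ some name))).map
        (fun name => (name, (0 : Int))))
  let width : Int := hours.foldl (fun w row => max w (row.length : Int)) 0
  ((PySem.List.pyRange 1 (min (names.length : Int) width) 1).foldl (fun d i =>
      let key := PySem.List.pyGetD names i ""
      hours.foldl (fun d row =>
        if i < (row.length : Int) then d.modify key 0 (· + PySem.List.pyGetD row i 0) else d) d)
    d0).items

-- ===== PRECONDITION & SPEC =====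
-- Pre_ excludes exactly the inputs where A raises: an IndexError when a row reaches a column
-- index i with no name (i ≥ len(names)), or a KeyError when the name of a reached column
-- equals names[0] (that key is never created).
def Pre_hours_tally_py (names : List String) (hours : List (List Int)) : Prop :=
  ∀ row ∈ hours, ∀ i ∈ List.range row.length, 1 ≤ i →
    i < names.length ∧ names.getD i "" ≠ names.getD 0 ""
instance (names : List String) (hours : List (List Int)) :
    Decidable (Pre_hours_tally_py names hours) := by unfold Pre_hours_tally_py; infer_instance

def pvWitness_hours_tally_py : List String × List (List Int) :=
  (["a", "b", "c"], [[0, 1, 2], [5, 3, 4]])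

def Spec_hours_tally_py (names : List String) (hours : List (List Int))
    (out : List (String × Int)) : Prop := out = hours_tally_py_alt names hours
instance (names : List String) (hours : List (List Int)) (out : List (String × Int)) :
    Decidable (Spec_hours_tally_py names hours out) := by unfold Spec_hours_tally_py; infer_instance

-- ===== CLAIM (what is proved, stated in full; the proofs are below) =====
def Claim_equal_hours_tally_py : Prop := ∀ (names : List String) (hours : List (List Int)), Dom_hours_tally_py names hours → Pre_hours_tally_py names hours → Spec_hours_tally_py names hours (hours_tally_py names hours)

-- ===== LEMMAS AND PROOFS =====

-- the column sum B accumulates for column i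
def pvColS (hours : List (List Int)) (i : Int) : Int :=
  (hours.map (fun row => if i < (row.length : Int) then PySem.List.pyGetD row i 0 else 0)).sum

-- the per-row tail sum A accumulates at key k
def pvRowS (names : List String) (k : String) (row : List Int) : Int :=
  ((List.range (row.length - 1)).map
    (fun j => if names.getD (1 + j) "" = k then row.getD (1 + j) 0 else 0)).sum

lemma init_foldl_getD (p : String → Prop) [DecidablePred p] (k : String) :
    ∀ (l : List String) (d : PySem.Dict String Int), (∀ k', d.getD k' 0 = 0) →
      (l.foldl (fun d name => if p name then d.insert name 0 else d) d).getD k 0 = 0 := by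
  intro l
  induction l with
  | nil => intro d h; exact h k
  | cons x t ih =>
    intro d h
    simp only [List.foldl_cons]
    split_ifs with hx
    · exact ih _ (fun k' => by rw [PySem.Dict.getD_insert]; split_ifs <;> [rfl; exact h k'])
    · exact ih _ h

lemma init_foldl_nodup (p : String → Prop) [DecidablePred p] :
    ∀ (l : List String) (d : PySem.Dict String Int), d.keys.Nodup →
      (l.foldl (fun d name => if p name then d.insert name 0 else d) d).keys.Nodup := by
  intro l
  induction l with
  | nil => intro d h; exact h
  | cons x t ih =>
    intro d h
    simp only [List.foldl_cons]
    split_ifs with hx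
    · exact ih _ (PySem.Dict.nodup_keys_insert _ _ _ h)
    · exact ih _ h

lemma init_foldl_mem (p : String → Prop) [DecidablePred p] (k : String) :
    ∀ (l : List String) (d : PySem.Dict String Int),
      (k ∈ (l.foldl (fun d name => if p name then d.insert name 0 else d) d).keys ↔
        k ∈ d.keys ∨ (k ∈ l ∧ p k)) := by
  intro l
  induction l with
  | nil => intro d; simp
  | cons x t ih =>
    intro d
    simp only [List.foldl_cons]
    split_ifs with hx <;> rw [ih] <;>
      simp only [PySem.Dict.mem_keys_insert, List.mem_cons] <;>
      constructor
    · rintro (⟨h | h⟩ | ⟨h, hp⟩)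
      · exact Or.inr ⟨Or.inl h, h ▸ hx⟩
      · exact Or.inl h
      · exact Or.inr ⟨Or.inr h, hp⟩
    · rintro (h | ⟨h | h, hp⟩)
      · exact Or.inl (Or.inr h)
      · exact Or.inl (Or.inl h)
      · exact Or.inr ⟨h, hp⟩
    · rintro (h | ⟨h, hp⟩)
      · exact Or.inl h
      · exact Or.inr ⟨Or.inr h, hp⟩
    · rintro (h | ⟨h | h, hp⟩)
      · exact Or.inl h
      · exact absurd (h ▸ hp) hx
      · exact Or.inr ⟨h, hp⟩

lemma initB_eq_initA (p : String → Prop) [DecidablePred p] :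
    ∀ (l : List String) (d : PySem.Dict String Int),
      d.update ((l.filter (fun name => decide (p name))).map (fun name => (name, (0 : Int)))) =
        l.foldl (fun d name => if p name then d.insert name 0 else d) d := by
  intro l
  induction l with
  | nil => intro d; rfl
  | cons x t ih =>
    intro d
    simp only [List.foldl_cons, List.filter_cons]
    by_cases hx : p x
    · simp only [hx, decide_true]
      rw [← ih]
      rfl
    · simp only [hx, decide_false]
      exact ih d

lemma sum_map_sum_comm {α β : Type} (l : List α) (m : List β) (f : α → β → Int) :
    (l.map (fun a => (m.map (f a)).sum)).sum = (m.map (fun b => (l.map (fun a => f a b)).sum)).sum := by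
  induction l with
  | nil => simp
  | cons x t ih => simp [ih, List.sum_map_add]

lemma sum_range_extend (m M : Nat) (f : Nat → Int) (h : m ≤ M) (hz : ∀ j, m ≤ j → f j = 0) :
    ((List.range M).map f).sum = ((List.range m).map f).sum := by
  obtain ⟨c, rfl⟩ := Nat.exists_eq_add_of_le h
  rw [List.range_add, List.map_append, List.sum_append, List.map_map]
  have : ∀ x ∈ List.range c, (f ∘ fun x => m + x) x = 0 := by
    intro x _; exact hz _ (Nat.le_add_right _ _)
  rw [List.map_congr_left this]
  simp

lemma foldA_getD (names : List String) (k : String) :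
    ∀ (l : List Int) (s : Nat) (d : PySem.Dict String Int),
      (∀ j, j < l.length → s + j < names.length) →
      ((l.foldl (tallyStepA names) (d, (s : Int))).1).getD k 0
        = d.getD k 0 + ((List.range l.length).map
            (fun j => if names.getD (s + j) "" = k then l.getD j 0 else 0)).sum := by
  intro l
  induction l with
  | nil => intro s d h; simp
  | cons x t ih =>
    intro s d h
    have hs : s < names.length := by have := h 0 (by simp); omega
    have hget : PySem.List.pyGet? names (s : Int) = some (names.getD s "") := by
      rw [PySem.List.pyGet?_natCast]
      rw [List.getElem?_eq_getElem hs, List.getD_eq_getElem _ _ hs]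
    simp only [List.foldl_cons, tallyStepA, hget]
    have hcast : (s : Int) + 1 = ((s + 1 : Nat) : Int) := by push_cast; ring
    rw [hcast, ih (s + 1) _ (fun j hj => by have := h (j + 1) (by simpa using hj); omega)]
    rw [PySem.Dict.getD_modify]
    simp only [List.length_cons]
    rw [List.range_succ_eq_map, List.map_cons, List.map_map, List.sum_cons]
    have htail : ((List.range t.length).map
        ((fun j => if names.getD (s + j) "" = k then (x :: t).getD j 0 else 0) ∘ Nat.succ)) =
        ((List.range t.length).map
          (fun j => if names.getD (s + 1 + j) "" = k then t.getD j 0 else 0)) := by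
      apply List.map_congr_left
      intro j _
      simp only [Function.comp]
      have : s + Nat.succ j = s + 1 + j := by omega
      rw [this]
      rfl
    rw [htail]
    simp only [Nat.add_zero, List.getD_cons_zero]
    by_cases hk : k = names.getD s ""
    · rw [if_pos hk, if_pos hk.symm, hk]; ring
    · rw [if_neg hk, if_neg (fun h' => hk h'.symm)]; ring

lemma foldA_keys (names : List String) :
    ∀ (l : List Int) (s : Nat) (d : PySem.Dict String Int),
      (∀ j, j < l.length → s + j < names.length) →
      (∀ j, j < l.length → names.getD (s + j) "" ∈ d.keys) →
      ((l.foldl (tallyStepA names) (d, (s : Int))).1).keys = d.keys := by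
  intro l
  induction l with
  | nil => intro s d _ _; rfl
  | cons x t ih =>
    intro s d h hm
    have hs : s < names.length := by have := h 0 (by simp); omega
    have hget : PySem.List.pyGet? names (s : Int) = some (names.getD s "") := by
      rw [PySem.List.pyGet?_natCast]
      rw [List.getElem?_eq_getElem hs, List.getD_eq_getElem _ _ hs]
    simp only [List.foldl_cons, tallyStepA, hget]
    have hmem : names.getD s "" ∈ d.keys := by have := hm 0 (by simp); simpa using this
    have hkeys : (d.modify (names.getD s "") 0 (· + x)).keys = d.keys := by
      rw [PySem.Dict.keys_modify, PySem.Dict.keys_insert_of_contains]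
      exact (PySem.Dict.contains_iff_mem_keys _ _).2 hmem
    have hcast : (s : Int) + 1 = ((s + 1 : Nat) : Int) := by push_cast; ring
    rw [hcast, ih (s + 1) _ (fun j hj => by have := h (j + 1) (by simpa using hj); omega)
      (fun j hj => by
        rw [hkeys]
        have := hm (j + 1) (by simpa using hj)
        have he : s + (j + 1) = s + 1 + j := by omega
        rwa [he] at this)]
    exact hkeys

lemma tail_getD (row : List Int) (j : Nat) : row.tail.getD j 0 = row.getD (1 + j) 0 := by
  simp only [List.getD_eq_getElem?_getD, List.getElem?_tail, Nat.add_comm 1 j]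

lemma outerA_getD (names : List String) (k : String) :
    ∀ (hs : List (List Int)) (d : PySem.Dict String Int),
      (∀ row ∈ hs, ∀ i, 1 ≤ i → i < row.length → i < names.length) →
      (hs.foldl (fun d hour =>
          ((hour.tail).foldl (tallyStepA names) (d, ((1 : Nat) : Int))).1) d).getD k 0
        = d.getD k 0 + (hs.map (pvRowS names k)).sum := by
  intro hs
  induction hs with
  | nil => intro d _; simp
  | cons r t ih =>
    intro d h
    simp only [List.foldl_cons]
    have hb : ∀ j, j < r.tail.length → 1 + j < names.length := by
      intro j hj
      have : j < r.length - 1 := by simpa using hj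
      exact h r List.mem_cons_self (1 + j) (by omega) (by omega)
    rw [ih _ (fun row hrow => h row (List.mem_cons_of_mem _ hrow))]
    rw [foldA_getD names k r.tail 1 d hb]
    have hsum : ((List.range r.tail.length).map
        (fun j => if names.getD (1 + j) "" = k then r.tail.getD j 0 else 0)).sum
        = pvRowS names k r := by
      unfold pvRowS
      rw [List.length_tail]
      apply congrArg
      apply List.map_congr_left
      intro j _
      rw [tail_getD]
    rw [hsum]
    simp [add_assoc]

lemma outerA_keys (names : List String) :
    ∀ (hs : List (List Int)) (d : PySem.Dict String Int),
      (∀ row ∈ hs, ∀ i, 1 ≤ i → i < row.length → i < names.length) →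
      (∀ row ∈ hs, ∀ j, j < row.tail.length → names.getD (1 + j) "" ∈ d.keys) →
      (hs.foldl (fun d hour =>
          ((hour.tail).foldl (tallyStepA names) (d, ((1 : Nat) : Int))).1) d).keys = d.keys := by
  intro hs
  induction hs with
  | nil => intro d _ _; rfl
  | cons r t ih =>
    intro d h hm
    simp only [List.foldl_cons]
    have hb : ∀ j, j < r.tail.length → 1 + j < names.length := by
      intro j hj
      have : j < r.length - 1 := by simpa using hj
      exact h r List.mem_cons_self (1 + j) (by omega) (by omega)
    have hkeys : ((r.tail.foldl (tallyStepA names) (d, ((1 : Nat) : Int))).1).keys = d.keys :=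
      foldA_keys names r.tail 1 d hb (fun j hj => hm r List.mem_cons_self j hj)
    rw [ih _ (fun row hrow => h row (List.mem_cons_of_mem _ hrow))
      (fun row hrow j hj => hkeys ▸ hm row (List.mem_cons_of_mem _ hrow) j hj)]
    exact hkeys

lemma foldB_getD (key k : String) (i : Int) :
    ∀ (hs : List (List Int)) (d : PySem.Dict String Int),
      (hs.foldl (fun d row =>
          if i < (row.length : Int) then d.modify key 0 (· + PySem.List.pyGetD row i 0) else d)
        d).getD k 0
        = d.getD k 0 + (if key = k then pvColS hs i else 0) := by
  intro hs
  induction hs with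
  | nil => intro d; simp [pvColS]
  | cons r t ih =>
    intro d
    simp only [List.foldl_cons]
    have hcol : pvColS (r :: t) i =
        (if i < (r.length : Int) then PySem.List.pyGetD r i 0 else 0) + pvColS t i := by
      simp [pvColS]
    rw [hcol]
    by_cases hr : i < (r.length : Int)
    · rw [if_pos hr, ih, PySem.Dict.getD_modify]
      rw [if_pos hr]
      rcases eq_or_ne key k with hk | hk
      · subst hk; simp; ring
      · simp [if_neg hk, if_neg (Ne.symm hk)]
    · rw [if_neg hr, ih]
      rw [if_neg hr]
      rcases eq_or_ne key k with hk | hk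
      · subst hk; simp
      · simp [if_neg hk]

lemma foldB_keys (key : String) (i : Int) :
    ∀ (hs : List (List Int)) (d : PySem.Dict String Int),
      (key ∈ d.keys ∨ ∀ row ∈ hs, ¬ (i < (row.length : Int))) →
      (hs.foldl (fun d row =>
          if i < (row.length : Int) then d.modify key 0 (· + PySem.List.pyGetD row i 0) else d)
        d).keys = d.keys := by
  intro hs
  induction hs with
  | nil => intro d _; rfl
  | cons r t ih =>
    intro d h
    simp only [List.foldl_cons]
    by_cases hr : i < (r.length : Int)
    · have hmem : key ∈ d.keys := by
        rcases h with h | h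
        · exact h
        · exact absurd hr (h r (List.mem_cons_self))
      have hkeys : (d.modify key 0 (· + PySem.List.pyGetD r i 0)).keys = d.keys := by
        rw [PySem.Dict.keys_modify, PySem.Dict.keys_insert_of_contains]
        exact (PySem.Dict.contains_iff_mem_keys _ _).2 hmem
      rw [if_pos hr, ih _ (Or.inl (hkeys ▸ hmem))]
      exact hkeys
    · rw [if_neg hr]
      apply ih
      rcases h with h | h
      · exact Or.inl h
      · exact Or.inr (fun row hrow => h row (List.mem_cons_of_mem _ hrow))

lemma outerB_getD (names : List String) (k : String) (hs : List (List Int)) :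
    ∀ (is : List Int) (d : PySem.Dict String Int),
      (is.foldl (fun d i =>
          let key := PySem.List.pyGetD names i ""
          hs.foldl (fun d row =>
            if i < (row.length : Int) then d.modify key 0 (· + PySem.List.pyGetD row i 0) else d)
            d) d).getD k 0
        = d.getD k 0 + (is.map (fun i =>
            if PySem.List.pyGetD names i "" = k then pvColS hs i else 0)).sum := by
  intro is
  induction is with
  | nil => intro d; simp
  | cons i t ih =>
    intro d
    simp only [List.foldl_cons, List.map_cons, List.sum_cons]
    rw [ih, foldB_getD]
    ring

lemma outerB_keys (names : List String) (hs : List (List Int)) :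
    ∀ (is : List Int) (d : PySem.Dict String Int),
      (∀ i ∈ is, (PySem.List.pyGetD names i "" ∈ d.keys) ∨ ∀ row ∈ hs, ¬ (i < (row.length : Int))) →
      (is.foldl (fun d i =>
          let key := PySem.List.pyGetD names i ""
          hs.foldl (fun d row =>
            if i < (row.length : Int) then d.modify key 0 (· + PySem.List.pyGetD row i 0) else d)
            d) d).keys = d.keys := by
  intro is
  induction is with
  | nil => intro d _; rfl
  | cons i t ih =>
    intro d h
    simp only [List.foldl_cons]
    have hkeys := foldB_keys (PySem.List.pyGetD names i "") i hs d (h i List.mem_cons_self)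
    rw [ih _ (fun i' hi' => by
      rcases h i' (List.mem_cons_of_mem _ hi') with h' | h'
      · exact Or.inl (hkeys ▸ h')
      · exact Or.inr h')]
    exact hkeys

lemma sums_eq (names : List String) (k : String) (hours : List (List Int))
    (hpre : ∀ row ∈ hours, ∀ i : Nat, 1 ≤ i → i < row.length → i < names.length) :
    (hours.map (pvRowS names k)).sum
      = ((PySem.List.pyRange 1 (names.length : Int) 1).map (fun i =>
          if PySem.List.pyGetD names i "" = k then pvColS hours i else 0)).sum := by
  have hn : (((names.length : Int)) - 1).toNat = names.length - 1 := by omega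
  rw [PySem.List.pyRange_one, hn, List.map_map]
  -- F j row : contribution of row at column 1+j
  set F : Nat → List Int → Int := fun j row =>
    if 1 + j < row.length ∧ names.getD (1 + j) "" = k then row.getD (1 + j) 0 else 0 with hF
  have hterm : ∀ j : Nat,
      ((fun i => if PySem.List.pyGetD names i "" = k then pvColS hours i else 0) ∘
        (fun j : Nat => (1 : Int) + (j : Int))) j
      = (hours.map (fun row => F j row)).sum := by
    intro j
    simp only [Function.comp]
    have hcast : (1 : Int) + (j : Int) = ((1 + j : Nat) : Int) := by push_cast; ring
    rw [hcast, PySem.List.pyGetD_natCast]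
    by_cases hk : names.getD (1 + j) "" = k
    · rw [if_pos hk]
      unfold pvColS
      apply congrArg
      apply List.map_congr_left
      intro row _
      rw [PySem.List.pyGetD_natCast]
      by_cases hlen : 1 + j < row.length
      · rw [if_pos (by exact_mod_cast hlen), hF]
        simp only [if_pos (And.intro hlen hk)]
      · rw [if_neg (by exact_mod_cast hlen), hF]
        simp only
        rw [if_neg (fun h => hlen h.1)]
    · rw [if_neg hk]
      have : ∀ row ∈ hours, F j row = 0 := by
        intro row _
        rw [hF]; simp only
        rw [if_neg (fun h => hk h.2)]
      rw [List.map_congr_left this]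
      simp
  rw [List.map_congr_left (fun j _ => hterm j)]
  rw [← sum_map_sum_comm hours (List.range (names.length - 1)) (fun row j => F j row)]
  apply congrArg
  apply List.map_congr_left
  intro row hrow
  -- per-row: range (n-1) collapses to range (row.length - 1)
  have hle : row.length - 1 ≤ names.length - 1 := by
    rcases Nat.lt_or_ge row.length 2 with h2 | h2
    · omega
    · have := hpre row hrow (row.length - 1) (by omega) (by omega)
      omega
  have hz : ∀ j, row.length - 1 ≤ j → F j row = 0 := by
    intro j hj
    rw [hF]; simp only
    rw [if_neg (fun h => by omega)]
  rw [sum_range_extend (row.length - 1) (names.length - 1) (fun j => F j row) hle hz]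
  unfold pvRowS
  apply congrArg
  apply List.map_congr_left
  intro j hj
  have hjlt : 1 + j < row.length := by
    have := List.mem_range.1 hj; omega
  simp only [hF]
  by_cases hk : names.getD (1 + j) "" = k
  · rw [if_pos hk, if_pos (And.intro hjlt hk)]
  · rw [if_neg hk, if_neg (fun h => hk h.2)]

lemma colS_zero (hours : List (List Int)) (i : Int)
    (hw : ∀ row ∈ hours, (row.length : Int) ≤ i) : pvColS hours i = 0 := by
  unfold pvColS
  rw [List.map_congr_left (fun row hrow => if_neg (not_lt.2 (hw row hrow)))]
  simp

lemma width_le (hours : List (List Int)) :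
    ∀ row ∈ hours, (row.length : Int) ≤ hours.foldl (fun w row => max w (row.length : Int)) 0 :=
  (PySem.List.le_foldl_max_int hours (fun row => (row.length : Int)) 0).2

lemma sum_range_min (names : List String) (k : String) (hours : List (List Int)) (width : Int)
    (hwidth : ∀ row ∈ hours, (row.length : Int) ≤ width) :
    ((PySem.List.pyRange 1 (min (names.length : Int) width) 1).map (fun i =>
        if PySem.List.pyGetD names i "" = k then pvColS hours i else 0)).sum
      = ((PySem.List.pyRange 1 (names.length : Int) 1).map (fun i =>
          if PySem.List.pyGetD names i "" = k then pvColS hours i else 0)).sum := by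
  set m : Int := min (names.length : Int) width with hm
  have hterm0 : ∀ i : Int, m ≤ i → i < (names.length : Int) →
      (if PySem.List.pyGetD names i "" = k then pvColS hours i else 0) = 0 := by
    intro i hmi hin
    have hcol : pvColS hours i = 0 := by
      apply colS_zero
      intro row hrow
      have := hwidth row hrow
      rcases le_or_gt width (names.length : Int) with hc | hc
      · have : m = width := by rw [hm]; exact min_eq_right hc
        omega
      · have : m = (names.length : Int) := by rw [hm]; exact min_eq_left (le_of_lt hc)
        omega
    rw [hcol]
    split_ifs <;> rfl
  by_cases h1m : 1 ≤ m
  · rw [PySem.List.pyRange_one_append 1 m (names.length : Int) h1m (by omega)]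
    rw [List.map_append, List.sum_append]
    have : ∀ i ∈ PySem.List.pyRange m (names.length : Int) 1,
        (if PySem.List.pyGetD names i "" = k then pvColS hours i else 0) = 0 := by
      intro i hi
      obtain ⟨hmi, hin⟩ := (PySem.List.mem_pyRange_one).1 hi
      exact hterm0 i hmi hin
    rw [List.map_congr_left this]
    simp
  · rw [PySem.List.pyRange_one_eq_nil (b := m) (by omega)]
    have : ∀ i ∈ PySem.List.pyRange 1 (names.length : Int) 1,
        (if PySem.List.pyGetD names i "" = k then pvColS hours i else 0) = 0 := by
      intro i hi
      obtain ⟨h1i, hin⟩ := (PySem.List.mem_pyRange_one).1 hi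
      exact hterm0 i (by omega) hin
    rw [List.map_congr_left this]
    simp

lemma ports_eq (names : List String) (hours : List (List Int))
    (hpre : Pre_hours_tally_py names hours) :
    hours_tally_py names hours = hours_tally_py_alt names hours := by
  have hlen : ∀ row ∈ hours, ∀ i : Nat, 1 ≤ i → i < row.length → i < names.length :=
    fun row hr i h1 h2 => (hpre row hr i (List.mem_range.2 h2) h1).1
  have hne : ∀ row ∈ hours, ∀ i : Nat, 1 ≤ i → i < row.length →
      names.getD i "" ≠ names.getD 0 "" :=
    fun row hr i h1 h2 => (hpre row hr i (List.mem_range.2 h2) h1).2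
  set p : String → Prop := fun name => PySem.List.pyGet? names 0 ≠ some name with hp
  set d0 : PySem.Dict String Int :=
    names.foldl (fun d name => if p name then d.insert name 0 else d) PySem.Dict.empty with hd0
  have hd0getD : ∀ k', d0.getD k' 0 = 0 :=
    fun k' => init_foldl_getD p k' names PySem.Dict.empty (fun _ => by simp [PySem.Dict.getD_empty])
  have hd0nodup : d0.keys.Nodup :=
    init_foldl_nodup p names PySem.Dict.empty (by simp [PySem.Dict.keys_empty])
  have hd0mem : ∀ k', k' ∈ d0.keys ↔ k' ∈ names ∧ p k' := by
    intro k'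
    rw [hd0, init_foldl_mem]
    simp [PySem.Dict.keys_empty]
  -- a valid, non-first column name is a key of the zero dict
  have hkey : ∀ i : Nat, 1 ≤ i → i < names.length →
      names.getD i "" ≠ names.getD 0 "" → names.getD i "" ∈ d0.keys := by
    intro i h1 hilt hne'
    refine (hd0mem _).2 ⟨?_, ?_⟩
    · rw [List.getD_eq_getElem _ _ hilt]
      exact List.getElem_mem _
    · rw [hp]
      intro hEq
      have h0 : (0 : Nat) < names.length := by omega
      rw [show (0 : Int) = ((0 : Nat) : Int) from rfl, PySem.List.pyGet?_natCast,
        List.getElem?_eq_getElem h0] at hEq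
      exact hne' (by rw [List.getD_eq_getElem _ _ h0]; exact (Option.some.inj hEq).symm)
  -- A's tally
  have keysA := outerA_keys names hours d0 hlen (fun row hr j hj => by
    have hjlt : 1 + j < row.length := by
      have : j < row.length - 1 := by simpa using hj
      omega
    exact hkey (1 + j) (by omega) (hlen row hr (1 + j) (by omega) hjlt)
      (hne row hr (1 + j) (by omega) hjlt))
  have getDA := fun k => outerA_getD names k hours d0 hlen
  -- B's tally
  set width : Int := hours.foldl (fun w row => max w (row.length : Int)) 0 with hwidthdef
  set m : Int := min (names.length : Int) width with hmdef
  have keymemB : ∀ i ∈ PySem.List.pyRange 1 m 1,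
      (PySem.List.pyGetD names i "" ∈ d0.keys) ∨ ∀ row ∈ hours, ¬ (i < (row.length : Int)) := by
    intro i hi
    obtain ⟨hi1, hi2'⟩ := (PySem.List.mem_pyRange_one).1 hi
    have hi2 : i < (names.length : Int) := by omega
    by_cases hreach : ∃ row ∈ hours, i < (row.length : Int)
    · obtain ⟨row, hrow, hlt⟩ := hreach
      left
      have h0i : (0 : Int) ≤ i := by omega
      have hin : i.toNat < names.length := by omega
      have hir : i.toNat < row.length := by omega
      have h1i : 1 ≤ i.toNat := by omega
      have hkeyeq : PySem.List.pyGetD names i "" = names.getD i.toNat "" :=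
        PySem.List.pyGetD_of_nonneg names "" h0i
      rw [hkeyeq]
      exact hkey i.toNat h1i hin (hne row hrow i.toNat h1i hir)
    · right
      intro row hrow hlt
      exact hreach ⟨row, hrow, hlt⟩
  have keysB := outerB_keys names hours (PySem.List.pyRange 1 m 1) d0 keymemB
  have getDB := fun k => outerB_getD names k hours (PySem.List.pyRange 1 m 1) d0
  -- assemble: same keys, same values
  simp only [hours_tally_py, hours_tally_py_alt]
  have hfold : (names.foldl (fun d name =>
      if PySem.List.pyGet? names 0 ≠ some name then d.insert name 0 else d)
      (PySem.Dict.empty : PySem.Dict String Int)) = d0 := rfl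
  rw [hfold]
  have hinit : PySem.Dict.ofList
      ((names.filter (fun name => decide (PySem.List.pyGet? names 0 ≠ some name))).map
        (fun name => (name, (0 : Int)))) = d0 := initB_eq_initA p names PySem.Dict.empty
  rw [hinit]
  set dA := hours.foldl (fun d hour =>
    ((PySem.List.slice hour (some 1) none).foldl (tallyStepA names) (d, 1)).1) d0 with hdA
  set dB := (PySem.List.pyRange 1 m 1).foldl (fun d i =>
      let key := PySem.List.pyGetD names i ""
      hours.foldl (fun d row =>
        if i < (row.length : Int) then d.modify key 0 (· + PySem.List.pyGetD row i 0) else d) d)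
    d0 with hdB
  have hdA' : dA = hours.foldl (fun d hour =>
      ((hour.tail).foldl (tallyStepA names) (d, ((1 : Nat) : Int))).1) d0 := by
    rw [hdA]
    simp [PySem.List.slice_from_one]
  have hkeysAB : dA.keys = dB.keys := by
    rw [hdA', keysA, keysB]
  have hgetDAB : ∀ k, dA.getD k 0 = dB.getD k 0 := by
    intro k
    rw [hdA', getDA k, getDB k, hd0getD k, sums_eq names k hours hlen,
      ← sum_range_min names k hours width (width_le hours)]
  have hnodupA : dA.keys.Nodup := by rw [hdA', keysA]; exact hd0nodup
  have hnodupB : dB.keys.Nodup := by rw [keysB]; exact hd0nodup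
  rw [PySem.Dict.items_eq_map_keys dA hnodupA 0, PySem.Dict.items_eq_map_keys dB hnodupB 0,
    hkeysAB]
  exact List.map_congr_left (fun k _ => by rw [hgetDAB k])

-- ===== VERDICT (by name: the statement is the Claim_ definition above) =====
theorem hours_tally_py_spec : Claim_equal_hours_tally_py := by
  intro names hours _ hpre
  unfold Spec_hours_tally_py
  exact ports_eq names hours hpre
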